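-- pv_equiv track=rewrite | github.com/CosminPanaite/Lab2FLCD-Scanner | main.py | is_const_caracter
-- ===== SOURCE A (Python) =====
-- def is_const_caracter(token):
--     characters = {'\'A\'',
--                   '\'B\'',
--                   '\'C\'',
--                   '\'D\'',
--                   '\'E\'',
--                   '\'F\'',
--                   '\'G\'',
--                   '\'H\'',
--                   '\'I\'',
--                   '\'J\'',
--                   '\'K\'',
--                   '\'L\'',
--                   '\'M\'',
--                   '\'N\'',
--                   '\'O\'',
--                   '\'P\'',
--                   '\'Q\'',
--                   '\'R\'',
--                   '\'S\'',
--                   '\'T\'',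
--                   '\'U\'',
--                   '\'V\'',
--                   '\'W\'',
--                   '\'X\'',
--                   '\'Y\'',
--                   '\'Z\'',
--                   '\'_\'',
--                   }
--
--     digits = ['\'0\'',
--               '\'1\'',
--               '\'2\'',
--               '\'3\'',
--               '\'4\'',
--               '\'5\'',
--               '\'6\'',
--               '\'7\'',
--               '\'8\'',
--               '\'9\'',
--               ]
--     token = token.strip()
--     ok = 0
--     if token not in characters and token not in digits:
--         done = False
--         for litera in characters:
--             if token == litera.lower():
--                 done = True
--         if not done:
--             ok += 1
--     if ok == 0:
--         return True
-- ===== SOURCE B (Python) =====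
-- def is_const_caracter(token):
--     t = token.strip()
--     if len(t) == 3 and t[0] == "'" and t[2] == "'":
--         c = t[1]
--         if ('A' <= c <= 'Z') or ('a' <= c <= 'z') or ('0' <= c <= '9') or c == '_':
--             return True
-- ===== Notes on version B (the rewrite author's own statement) =====
-- stated objective: simpler
-- what changed: A tests the stripped token against two enumerated literal sets plus a loop comparing against lowercased set elements; B instead checks the token's structure directly: length 3, surrounding single quotes, and inner character in ASCII [A-Za-z0-9_].
import Mathlib
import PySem

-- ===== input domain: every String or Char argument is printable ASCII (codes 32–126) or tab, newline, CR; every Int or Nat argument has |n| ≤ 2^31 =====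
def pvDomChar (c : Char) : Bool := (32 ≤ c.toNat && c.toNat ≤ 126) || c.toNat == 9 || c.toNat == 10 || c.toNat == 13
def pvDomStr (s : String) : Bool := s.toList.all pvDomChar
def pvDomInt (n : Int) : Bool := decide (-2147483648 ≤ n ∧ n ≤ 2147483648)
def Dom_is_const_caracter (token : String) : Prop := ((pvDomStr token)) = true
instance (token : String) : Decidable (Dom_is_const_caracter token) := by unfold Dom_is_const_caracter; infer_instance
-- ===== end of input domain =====

-- B replaces A's enumerated token sets and lowercase-scanning loop with a structural check of
-- the quoted-character shape (length 3, surrounding quotes, inner char in [A-Za-z0-9_]); objective: simpler.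

-- ===== PORT A =====
def pvCharactersA : PySem.Set String := PySem.Set.ofList
  ["'A'", "'B'", "'C'", "'D'", "'E'", "'F'", "'G'", "'H'", "'I'", "'J'", "'K'", "'L'", "'M'",
   "'N'", "'O'", "'P'", "'Q'", "'R'", "'S'", "'T'", "'U'", "'V'", "'W'", "'X'", "'Y'", "'Z'", "'_'"]

def pvDigitsA : List String :=
  ["'0'", "'1'", "'2'", "'3'", "'4'", "'5'", "'6'", "'7'", "'8'", "'9'"]

-- A's 'for litera in characters' consumes the set only through an any-style flag, so the
-- (unmodelled) hash iteration order cannot affect the result; the loop is ported as a foldl.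
def is_const_caracter (token : String) : Option Bool :=
  let characters := pvCharactersA
  let digits := pvDigitsA
  let token := PySem.Str.strip token
  let ok : Int := 0
  let ok :=
    if !(PySem.Set.contains characters token) && !(digits.contains token) then
      let done := characters.foldl
        (fun done litera => if token == PySem.Str.lower litera then true else done) false
      if !done then ok + 1 else ok
    else ok
  if ok == 0 then some true else none

-- ===== PORT B =====
def is_const_caracter_alt (token : String) : Option Bool :=
  let t := PySem.Str.strip token
  if PySem.Str.len t == 3 && PySem.Str.pyGet? t 0 == some '\'' && PySem.Str.pyGet? t 2 == some '\'' then
    match PySem.Str.pyGet? t 1 with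
    | some c =>
      if ('A' ≤ c && c ≤ 'Z') || ('a' ≤ c && c ≤ 'z') || ('0' ≤ c && c ≤ '9') || c == '_' then
        some true
      else none
    | none => none   -- unreachable: t has length 3, so t[1] exists
  else none

-- ===== PRECONDITION & SPEC =====
def Spec_is_const_caracter (token : String) (out : Option Bool) : Prop := out = is_const_caracter_alt token
instance (token : String) (out : Option Bool) : Decidable (Spec_is_const_caracter token out) := by unfold Spec_is_const_caracter; infer_instance

-- ===== CLAIM (what is proved, stated in full; the proofs are below) =====
def Claim_equal_is_const_caracter : Prop := ∀ (token : String), Dom_is_const_caracter token → Spec_is_const_caracter token (is_const_caracter token)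

-- ===== LEMMAS AND PROOFS =====

theorem char_eq_iff (b d : Char) : (b = d) ↔ b.toNat = d.toNat := by
  constructor
  · rintro rfl; rfl
  · intro h; apply Char.ext; exact UInt32.toNat_inj.mp h

theorem char_le_iff (b d : Char) : (b ≤ d) ↔ b.toNat ≤ d.toNat := by
  rw [Char.le_def, UInt32.le_iff_toNat_le]; rfl

theorem beq_lit (l : List Char) (s : String) : (String.ofList l == s) = (l == s.toList) := by
  rw [Bool.eq_iff_iff]; simp [← String.toList_inj]

theorem pvCharactersA_eq : pvCharactersA =
    ["'A'", "'B'", "'C'", "'D'", "'E'", "'F'", "'G'", "'H'", "'I'", "'J'", "'K'", "'L'", "'M'",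
     "'N'", "'O'", "'P'", "'Q'", "'R'", "'S'", "'T'", "'U'", "'V'", "'W'", "'X'", "'Y'", "'Z'", "'_'"] := by
  decide

-- the common normal form of both ports on the stripped token's character list
def pvGood (l : List Char) : Bool :=
  match l with
  | [a, b, c] => a == '\'' && c == '\'' &&
      (('A' ≤ b && b ≤ 'Z') || ('a' ≤ b && b ≤ 'z') || ('0' ≤ b && b ≤ '9') || b == '_')
  | _ => false

theorem alt_eq (token : String) :
    is_const_caracter_alt token = if pvGood (PySem.Str.strip token).toList then some true else none := by
  unfold is_const_caracter_alt
  generalize PySem.Str.strip token = t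
  rw [← String.ofList_toList (s := t)]
  generalize t.toList = l
  match l with
  | [] => decide
  | [a] =>
    have h : (PySem.Str.len (String.ofList [a]) == 3) = false := by
      simp [PySem.Str.len_eq]
    simp only [pvGood, h, String.toList_ofList, Bool.false_and, if_neg Bool.false_ne_true]
  | [a, b] =>
    have h : (PySem.Str.len (String.ofList [a, b]) == 3) = false := by
      simp [PySem.Str.len_eq]
    simp only [pvGood, h, String.toList_ofList, Bool.false_and, if_neg Bool.false_ne_true]
  | [a, b, c] =>
    have h : (PySem.Str.len (String.ofList [a, b, c]) == 3) = true := by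
      simp [PySem.Str.len_eq]
    have h0 : PySem.Str.pyGet? (String.ofList [a, b, c]) 0 = some a := by
      simp [PySem.Str.pyGet?_eq, PySem.Chars.pyGet?_eq_listPyGet?, PySem.List.pyGet?, PySem.List.pyIdx?]
    have h1 : PySem.Str.pyGet? (String.ofList [a, b, c]) 1 = some b := by
      simp [PySem.Str.pyGet?_eq, PySem.Chars.pyGet?_eq_listPyGet?, PySem.List.pyGet?, PySem.List.pyIdx?]
    have h2 : PySem.Str.pyGet? (String.ofList [a, b, c]) 2 = some c := by
      simp [PySem.Str.pyGet?_eq, PySem.Chars.pyGet?_eq_listPyGet?, PySem.List.pyGet?, PySem.List.pyIdx?]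
    simp only [pvGood, h, h0, h1, h2, String.toList_ofList, Bool.true_and]
    by_cases ha : a = '\''
    · by_cases hc : c = '\''
      · simp [ha, hc]
      · simp [hc]
    · simp [ha]
  | a :: b :: c :: d :: rest =>
    have h : (PySem.Str.len (String.ofList (a :: b :: c :: d :: rest)) == 3) = false := by
      simp [PySem.Str.len_eq]; omega
    simp only [pvGood, h, String.toList_ofList, Bool.false_and, if_neg Bool.false_ne_true]

theorem foldl_flag (s : String) (ls : List String) (init : Bool) :
    ls.foldl (fun done litera => if s == PySem.Str.lower litera then true else done) init
      = (init || ls.any fun litera => s == PySem.Str.lower litera) := by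
  induction ls generalizing init with
  | nil => simp
  | cons x xs ih =>
    simp only [List.foldl_cons, List.any_cons, ih]
    cases s == PySem.Str.lower x <;> simp

theorem a_eq (token : String) :
    is_const_caracter token =
      (if PySem.Set.contains pvCharactersA (PySem.Str.strip token)
          || pvDigitsA.contains (PySem.Str.strip token)
          || pvCharactersA.any (fun w => PySem.Str.strip token == PySem.Str.lower w)
       then some true else none) := by
  unfold is_const_caracter
  simp only [foldl_flag, Bool.false_or]
  cases hc : PySem.Set.contains pvCharactersA (PySem.Str.strip token) <;>
    cases hd : pvDigitsA.contains (PySem.Str.strip token) <;>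
      cases ha : pvCharactersA.any (fun w => PySem.Str.strip token == PySem.Str.lower w) <;>
        simp

theorem cond_eq (l : List Char) :
    (PySem.Set.contains pvCharactersA (String.ofList l)
      || pvDigitsA.contains (String.ofList l)
      || pvCharactersA.any (fun w => String.ofList l == PySem.Str.lower w)) = pvGood l := by
  simp only [pvCharactersA_eq, pvDigitsA, PySem.Set.contains, List.contains_cons,
    List.contains_nil, List.any_cons, List.any_nil, beq_lit,
      show PySem.Str.lower "'A'" = "'a'" from by decide,
      show PySem.Str.lower "'B'" = "'b'" from by decide,
      show PySem.Str.lower "'C'" = "'c'" from by decide,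
      show PySem.Str.lower "'D'" = "'d'" from by decide,
      show PySem.Str.lower "'E'" = "'e'" from by decide,
      show PySem.Str.lower "'F'" = "'f'" from by decide,
      show PySem.Str.lower "'G'" = "'g'" from by decide,
      show PySem.Str.lower "'H'" = "'h'" from by decide,
      show PySem.Str.lower "'I'" = "'i'" from by decide,
      show PySem.Str.lower "'J'" = "'j'" from by decide,
      show PySem.Str.lower "'K'" = "'k'" from by decide,
      show PySem.Str.lower "'L'" = "'l'" from by decide,
      show PySem.Str.lower "'M'" = "'m'" from by decide,
      show PySem.Str.lower "'N'" = "'n'" from by decide,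
      show PySem.Str.lower "'O'" = "'o'" from by decide,
      show PySem.Str.lower "'P'" = "'p'" from by decide,
      show PySem.Str.lower "'Q'" = "'q'" from by decide,
      show PySem.Str.lower "'R'" = "'r'" from by decide,
      show PySem.Str.lower "'S'" = "'s'" from by decide,
      show PySem.Str.lower "'T'" = "'t'" from by decide,
      show PySem.Str.lower "'U'" = "'u'" from by decide,
      show PySem.Str.lower "'V'" = "'v'" from by decide,
      show PySem.Str.lower "'W'" = "'w'" from by decide,
      show PySem.Str.lower "'X'" = "'x'" from by decide,
      show PySem.Str.lower "'Y'" = "'y'" from by decide,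
      show PySem.Str.lower "'Z'" = "'z'" from by decide,
      show PySem.Str.lower "'_'" = "'_'" from by decide]
  simp only [String.reduceToList]
  match l with
  | [] => decide
  | [a] => simp [pvGood]
  | [a, b] => simp [pvGood]
  | [a, b, c] =>
    simp only [pvGood, List.cons_beq_cons, Bool.or_false]
    by_cases ha : a = '\''
    · by_cases hc : c = '\''
      · subst ha hc
        rw [Bool.eq_iff_iff]
        simp only [Bool.and_eq_true, Bool.or_eq_true, beq_iff_eq, decide_eq_true_eq,
          char_eq_iff, char_le_iff, Char.reduceToNat, true_and, and_true]
        omega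
      · have hc' : (c == '\'') = false := by simp [hc]
        simp [hc']
    · have ha' : (a == '\'') = false := by simp [ha]
      simp [ha']
  | a :: b :: c :: d :: rest => simp [pvGood]

-- ===== VERDICT (by name: the statement is the Claim_ definition above) =====
theorem is_const_caracter_spec : Claim_equal_is_const_caracter := by
  intro token _
  unfold Spec_is_const_caracter
  rw [a_eq, alt_eq]
  rw [show PySem.Str.strip token = String.ofList (PySem.Str.strip token).toList from
    (String.ofList_toList).symm]
  rw [cond_eq]
  simp
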